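-- pv_equiv track=rewrite | github.com/petlindg/advent-of-code | 2025/7/solution2.py | solve
-- ===== SOURCE A (Python) =====
-- from collections import defaultdict
--
-- def solve(input):
--     s = input.pop(0).index('S')
--     beams = defaultdict(int)
--     beams[s] = 1
--     size_y = len(input)
--     for y in range(size_y):
--         tmp = defaultdict(int)
--         for b in beams.keys():
--             c = input[y][b]
--             count = beams[b]
--             if c == '^':
--                 tmp[b-1] += count
--                 tmp[b+1] += count
--             else:
--                 tmp[b] += count
--         beams = tmp.copy()
--     return sum(beams.values())
-- ===== SOURCE B (Python) =====
-- def solve(input):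
--     s = input.pop(0).index('S')
--     size_y = len(input)
--     memo = {}
--
--     def rec(row, col):
--         # number of beams that emerge at the bottom from one beam entering (row, col)
--         if row == size_y:
--             return 1
--         if (row, col) not in memo:
--             c = input[row][col]
--             if c == '^':
--                 memo[(row, col)] = rec(row + 1, col - 1) + rec(row + 1, col + 1)
--             else:
--                 memo[(row, col)] = rec(row + 1, col)
--         return memo[(row, col)]
--
--     return rec(0, s)
-- ===== Notes on version B (the rewrite author's own statement) =====
-- stated objective: alternative
-- what changed: Replaces the forward column-count dictionary simulation (row by row, accumulating beam counts per column) by a memoized top-down recursion rec(row,col) that computes the number of emerging beams per cell on demand; the total equals the forward sum because merging beams does not change the leaf count.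
import Mathlib
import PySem

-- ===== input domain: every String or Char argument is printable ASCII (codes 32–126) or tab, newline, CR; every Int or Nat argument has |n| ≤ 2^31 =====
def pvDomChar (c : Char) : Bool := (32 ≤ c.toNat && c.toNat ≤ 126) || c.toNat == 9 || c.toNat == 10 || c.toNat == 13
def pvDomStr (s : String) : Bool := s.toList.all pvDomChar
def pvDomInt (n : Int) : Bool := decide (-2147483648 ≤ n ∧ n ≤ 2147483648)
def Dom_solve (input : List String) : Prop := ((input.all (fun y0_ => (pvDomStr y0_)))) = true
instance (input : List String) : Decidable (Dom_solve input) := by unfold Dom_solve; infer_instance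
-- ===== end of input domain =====

-- B replaces A's forward per-column count dictionary by a memoized top-down recursion
-- counting emerging beams per cell (same cost, different decomposition); both Pythons
-- pop input[0] in place (identical side effect), the equivalence is about the return value.

-- shared primitive: the character read input[y][b] (Python wraps negative indices);
-- the default is never reached inside Pre_solve (out-of-range reads are IndexError, excluded)
def cellD (row : String) (c : Int) : Char := (PySem.Str.pyGet? row c).getD ' '

-- ===== PORT A =====
def stepRowA (row : String) (beams : PySem.Dict Int Int) : PySem.Dict Int Int :=
  beams.keys.foldl (fun tmp b =>
    let c := cellD row b
    let count := beams.getD b 0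
    if c = '^' then
      (tmp.modify (b - 1) (0 : Int) (· + count)).modify (b + 1) (0 : Int) (· + count)
    else
      tmp.modify b (0 : Int) (· + count)) PySem.Dict.empty

def solve (input : List String) : Int :=
  match input with
  | [] => 0  -- Python raises here; outside Pre_solve
  | row0 :: rest =>
    let s : Int := PySem.Str.find row0 "S"  -- row0.index('S'); -1 only when Python raises ValueError (outside Pre_solve)
    let final := rest.foldl (fun beams row => stepRowA row beams) (PySem.Dict.empty.insert s 1)
    final.values.sum

-- ===== PORT B =====
def recB : List String → Nat → Int → PySem.Dict (Nat × Int) Int → Int × PySem.Dict (Nat × Int) Int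
  | [], _, _, memo => (1, memo)
  | r :: rs, rowIdx, col, memo =>
    match memo.get? (rowIdx, col) with
    | some v => (v, memo)
    | none =>
      if cellD r col = '^' then
        let p1 := recB rs (rowIdx + 1) (col - 1) memo
        let p2 := recB rs (rowIdx + 1) (col + 1) p1.2
        (p1.1 + p2.1, p2.2.insert (rowIdx, col) (p1.1 + p2.1))
      else
        let p := recB rs (rowIdx + 1) col memo
        (p.1, p.2.insert (rowIdx, col) p.1)

def solve_alt (input : List String) : Int :=
  match input with
  | [] => 0  -- Python B raises here too; outside Pre_solve
  | row0 :: rest =>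
    (recB rest 0 (PySem.Str.find row0 "S") PySem.Dict.empty).1

-- ===== PRECONDITION & SPEC =====
-- the set of beam columns after one row (positions only, no counts)
def stepCols (row : String) (cols : List Int) : List Int :=
  PySem.Set.ofList (cols.flatMap (fun c => if cellD row c = '^' then [c - 1, c + 1] else [c]))

-- every beam position is a valid (possibly negative, Python-wrapping) index into its row
def okRows : List String → List Int → Bool
  | [], _ => true
  | r :: rs, cols =>
    cols.all (fun c => decide (-(PySem.Str.len r) ≤ c ∧ c < PySem.Str.len r)) && okRows rs (stepCols r cols)

-- Pre_solve = exactly the inputs where Python A returns: it raises IndexError when there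
-- is no line to pop, ValueError when 'S' is missing from the first line, and IndexError
-- as soon as any beam position leaves the index range of its row.
def Pre_solve (input : List String) : Prop :=
  input ≠ [] ∧ PySem.Str.isIn "S" (input.headD "") = true ∧
    okRows input.tail [PySem.Str.find (input.headD "") "S"] = true
instance (input : List String) : Decidable (Pre_solve input) := by unfold Pre_solve; infer_instance
def pvWitness_solve : List String := ["S", "^", "..."]
def Spec_solve (input : List String) (out : Int) : Prop := out = solve_alt input
instance (input : List String) (out : Int) : Decidable (Spec_solve input out) := by unfold Spec_solve; infer_instance

-- ===== CLAIM (what is proved, stated in full; the proofs are below) =====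
def Claim_equal_solve : Prop := ∀ (input : List String), Dom_solve input → Pre_solve input → Spec_solve input (solve input)

-- ===== LEMMAS AND PROOFS =====

-- the mathematical beam count: leaves of the split tree from one beam at column c
def g : List String → Int → Int
  | [], _ => 1
  | r :: rs, c => if cellD r c = '^' then g rs (c - 1) + g rs (c + 1) else g rs c

-- weighted sum of a count dictionary
def wsum (w : Int → Int) (d : PySem.Dict Int Int) : Int :=
  (d.keys.map (fun b => d.getD b 0 * w b)).sum

theorem map_sum_update_at (w : Int → Int) :
    ∀ (l : List Int) (k : Int) (F : Int → Int) (v : Int), l.Nodup → k ∈ l →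
      (l.map (fun b => (if b = k then F b + v else F b) * w b)).sum
        = (l.map (fun b => F b * w b)).sum + v * w k := by
  intro l
  induction l with
  | nil => intro k F v _ hk; simp at hk
  | cons a l ih =>
    intro k F v hnd hk
    rcases List.nodup_cons.mp hnd with ⟨ha, hndl⟩
    by_cases hak : a = k
    · subst hak
      have : ∀ b ∈ l, ((if b = a then F b + v else F b) * w b) = F b * w b := by
        intro b hb
        have : b ≠ a := fun h => ha (h ▸ hb)
        simp [this]
      rw [List.map_cons, List.sum_cons, List.map_congr_left this, if_pos rfl,
        List.map_cons, List.sum_cons]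
      ring
    · have hk' : k ∈ l := by
        rcases List.mem_cons.mp hk with h | h
        · exact absurd h.symm hak
        · exact h
      have := ih k F v hndl hk'
      simp only [List.map_cons, List.sum_cons, if_neg hak] at *
      omega

theorem nodup_keys_modify (d : PySem.Dict Int Int) (k v : Int) (f : Int → Int)
    (h : d.keys.Nodup) : (d.modify k v f).keys.Nodup := by
  rw [PySem.Dict.keys_modify]
  by_cases hc : d.contains k = true
  · rw [PySem.Dict.keys_insert_of_contains _ _ hc]; exact h
  · rw [PySem.Dict.keys_insert_of_not_contains _ _ (by simpa using hc)]
    have hk : k ∉ d.keys := fun hm => hc ((PySem.Dict.contains_iff_mem_keys d k).mpr hm)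
    apply List.Nodup.append h (by simp)
    intro a ha hb
    rw [List.mem_singleton] at hb
    exact hk (hb ▸ ha)

theorem wsum_modify_add (w : Int → Int) (d : PySem.Dict Int Int) (k v : Int)
    (h : d.keys.Nodup) : wsum w (d.modify k 0 (· + v)) = wsum w d + v * w k := by
  unfold wsum
  have hkeys : (d.modify k 0 (· + v)).keys = (d.insert k ((d.getD k 0) + v)).keys :=
    PySem.Dict.keys_modify d k 0 (· + v)
  have hgetD : ∀ b, (d.modify k 0 (· + v)).getD b 0 = if b = k then d.getD k 0 + v else d.getD b 0 :=
    fun b => PySem.Dict.getD_modify d k b 0 (· + v)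
  by_cases hc : d.contains k = true
  · have hkm : k ∈ d.keys := (PySem.Dict.contains_iff_mem_keys d k).mp hc
    rw [hkeys, PySem.Dict.keys_insert_of_contains _ _ hc]
    have hmap : (d.keys.map (fun b => (d.modify k 0 (· + v)).getD b 0 * w b))
        = d.keys.map (fun b => (if b = k then d.getD b 0 + v else d.getD b 0) * w b) := by
      apply List.map_congr_left
      intro b _
      rw [hgetD b]
      by_cases hbk : b = k <;> simp [hbk]
    rw [hmap, map_sum_update_at w d.keys k (fun b => d.getD b 0) v h hkm]
  · have hkm : k ∉ d.keys := fun hm => hc ((PySem.Dict.contains_iff_mem_keys d k).mpr hm)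
    have hcf : d.contains k = false := by simpa using hc
    rw [hkeys, PySem.Dict.keys_insert_of_not_contains d (k := k) (d.getD k 0 + v) hcf]
    have hd0 : d.getD k 0 = 0 := PySem.Dict.getD_of_not_contains d 0 hcf
    have hmap : (d.keys.map (fun b => (d.modify k 0 (· + v)).getD b 0 * w b))
        = d.keys.map (fun b => d.getD b 0 * w b) := by
      apply List.map_congr_left
      intro b hb
      have hbk : ¬ b = k := fun hh => hkm (hh ▸ hb)
      rw [hgetD b, if_neg hbk]
    simp [hmap, hgetD k, hd0]

theorem foldl_step_keys_wsum (row : String) (w : Int → Int) (D : Int → Int) :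
    ∀ (l : List Int) (tmp : PySem.Dict Int Int), tmp.keys.Nodup →
      (l.foldl (fun tmp b =>
        if cellD row b = '^' then
          (tmp.modify (b - 1) (0 : Int) (· + D b)).modify (b + 1) (0 : Int) (· + D b)
        else tmp.modify b (0 : Int) (· + D b)) tmp).keys.Nodup ∧
      wsum w (l.foldl (fun tmp b =>
        if cellD row b = '^' then
          (tmp.modify (b - 1) (0 : Int) (· + D b)).modify (b + 1) (0 : Int) (· + D b)
        else tmp.modify b (0 : Int) (· + D b)) tmp)
      = wsum w tmp + (l.map (fun b => D b * (if cellD row b = '^' then w (b - 1) + w (b + 1) else w b))).sum := by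
  intro l
  induction l with
  | nil => intro tmp h; exact ⟨h, by simp⟩
  | cons b l ih =>
    intro tmp h
    by_cases hb : cellD row b = '^'
    · have h1 := nodup_keys_modify tmp (b - 1) 0 (· + D b) h
      have h2 := nodup_keys_modify _ (b + 1) 0 (· + D b) h1
      have e1 := wsum_modify_add w tmp (b - 1) (D b) h
      have e2 := wsum_modify_add w (tmp.modify (b - 1) 0 (· + D b)) (b + 1) (D b) h1
      rcases ih _ h2 with ⟨hn, he⟩
      refine ⟨?_, ?_⟩
      · rw [List.foldl_cons, if_pos hb]; exact hn
      · rw [List.foldl_cons, if_pos hb, he, e2, e1, List.map_cons, List.sum_cons, if_pos hb]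
        ring
    · have h1 := nodup_keys_modify tmp b 0 (· + D b) h
      have e1 := wsum_modify_add w tmp b (D b) h
      rcases ih _ h1 with ⟨hn, he⟩
      refine ⟨?_, ?_⟩
      · rw [List.foldl_cons, if_neg hb]; exact hn
      · rw [List.foldl_cons, if_neg hb, he, e1, List.map_cons, List.sum_cons, if_neg hb]
        ring

theorem stepRowA_spec (row : String) (w : Int → Int) (d : PySem.Dict Int Int) :
    (stepRowA row d).keys.Nodup ∧
    wsum w (stepRowA row d) = wsum (fun b => if cellD row b = '^' then w (b - 1) + w (b + 1) else w b) d := by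
  have h0 : (PySem.Dict.empty : PySem.Dict Int Int).keys.Nodup := by
    simp [PySem.Dict.keys_empty]
  rcases foldl_step_keys_wsum row w (fun b => d.getD b 0) d.keys PySem.Dict.empty h0 with ⟨hn, he⟩
  refine ⟨hn, ?_⟩
  calc wsum w (stepRowA row d)
      = wsum w PySem.Dict.empty
        + (d.keys.map (fun b => d.getD b 0 * (if cellD row b = '^' then w (b - 1) + w (b + 1) else w b))).sum := he
    _ = wsum (fun b => if cellD row b = '^' then w (b - 1) + w (b + 1) else w b) d := by
        simp [wsum, PySem.Dict.keys_empty]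

theorem foldl_stepRowA (rows : List String) :
    ∀ (d : PySem.Dict Int Int), d.keys.Nodup →
      (rows.foldl (fun beams row => stepRowA row beams) d).values.sum = wsum (fun c => g rows c) d := by
  induction rows with
  | nil =>
    intro d h
    rw [List.foldl_nil, PySem.Dict.values_eq_map_keys d h 0]
    simp [wsum, g]
  | cons r rs ih =>
    intro d h
    rw [List.foldl_cons]
    rcases stepRowA_spec r (fun c => g rs c) d with ⟨hn, he⟩
    rw [ih (stepRowA r d) hn, he]
    have : (fun b => if cellD r b = '^' then g rs (b - 1) + g rs (b + 1) else g rs b)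
        = fun c => g (r :: rs) c := by
      funext c; simp [g]
    rw [this]

def InvB (rest : List String) (memo : PySem.Dict (Nat × Int) Int) : Prop :=
  ∀ r c v, memo.get? (r, c) = some v → v = g (rest.drop r) c

theorem recB_spec (rest : List String) :
    ∀ (rows : List String) (rowIdx : Nat) (col : Int) (memo : PySem.Dict (Nat × Int) Int),
      rows = rest.drop rowIdx → InvB rest memo →
      (recB rows rowIdx col memo).1 = g rows col ∧ InvB rest (recB rows rowIdx col memo).2 := by
  intro rows
  induction rows with
  | nil => intro rowIdx col memo _ hinv; exact ⟨rfl, hinv⟩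
  | cons r rs ih =>
    intro rowIdx col memo hdrop hinv
    have hrs : rs = rest.drop (rowIdx + 1) := by
      rw [← List.tail_drop, ← hdrop]; rfl
    cases hget : memo.get? (rowIdx, col) with
    | some v =>
      have hv : v = g (rest.drop rowIdx) col := hinv rowIdx col v hget
      rw [← hdrop] at hv
      simp only [recB, hget]
      exact ⟨hv.symm ▸ rfl, hinv⟩
    | none =>
      by_cases hc : cellD r col = '^'
      · rcases ih (rowIdx + 1) (col - 1) memo hrs hinv with ⟨hv1, hm1⟩
        rcases ih (rowIdx + 1) (col + 1) (recB rs (rowIdx + 1) (col - 1) memo).2 hrs hm1 with ⟨hv2, hm2⟩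
        simp only [recB, hget, if_pos hc]
        refine ⟨by rw [hv1, hv2]; simp [g, hc], ?_⟩
        intro r' c' v' hg'
        rw [PySem.Dict.get?_insert] at hg'
        split_ifs at hg' with heq
        · have h1 : r' = rowIdx := congrArg Prod.fst heq
          have h2 : c' = col := congrArg Prod.snd heq
          subst h1; subst h2
          have := Option.some.inj hg'
          rw [← this, hv1, hv2, ← hdrop]
          simp [g, hc]
        · exact hm2 r' c' v' hg'
      · rcases ih (rowIdx + 1) col memo hrs hinv with ⟨hv1, hm1⟩
        simp only [recB, hget, if_neg hc]
        refine ⟨by rw [hv1]; simp [g, hc], ?_⟩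
        intro r' c' v' hg'
        rw [PySem.Dict.get?_insert] at hg'
        split_ifs at hg' with heq
        · have h1 : r' = rowIdx := congrArg Prod.fst heq
          have h2 : c' = col := congrArg Prod.snd heq
          subst h1; subst h2
          have := Option.some.inj hg'
          rw [← this, hv1, ← hdrop]
          simp [g, hc]
        · exact hm1 r' c' v' hg' 

-- ===== VERDICT (by name: the statement is the Claim_ definition above) =====
theorem solve_eq_alt (input : List String) : solve input = solve_alt input := by
  cases input with
  | nil => rfl
  | cons row0 rest =>
    show (rest.foldl (fun beams row => stepRowA row beams)
        (PySem.Dict.empty.insert (PySem.Str.find row0 "S") 1)).values.sum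
      = (recB rest 0 (PySem.Str.find row0 "S") PySem.Dict.empty).1
    set s := PySem.Str.find row0 "S" with hs
    have hne : (PySem.Dict.empty : PySem.Dict Int Int).contains s = false :=
      PySem.Dict.contains_empty s
    have hkeys : (PySem.Dict.empty.insert s (1 : Int)).keys = [s] := by
      rw [PySem.Dict.keys_insert_of_not_contains _ _ hne, PySem.Dict.keys_empty,
        List.nil_append]
    have hnd : (PySem.Dict.empty.insert s (1 : Int)).keys.Nodup := by
      rw [hkeys]; simp
    rw [foldl_stepRowA rest _ hnd]
    have hB : (recB rest 0 s PySem.Dict.empty).1 = g rest s := by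
      have := recB_spec rest rest 0 s PySem.Dict.empty (by simp)
        (by intro r c v hg; rw [PySem.Dict.get?_empty] at hg; cases hg)
      exact this.1
    rw [hB]
    unfold wsum
    rw [hkeys]
    simp [PySem.Dict.getD_insert]

theorem solve_spec : Claim_equal_solve := by
  intro input _ _
  unfold Spec_solve
  exact solve_eq_alt input
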